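-- pv_equiv track=rewrite | github.com/ovsale/CodebaseGPT | codebasegpt/code_utils.py | trim_code
-- ===== SOURCE A (Python) =====
-- def trim_code(text: str) -> str:
--     lines = text.splitlines()
--     result = []
--
--     # replace more than 1 empty line with just 1 empty line
--     for line in lines:
--         if line.strip() == '' and (not result or result[-1].strip() == ''):
--             continue
--         result.append(line)
--
--     # remove empty lines at the end of the file
--     while result and result[-1].strip() == '':
--         result.pop()
--
--     return '\n'.join(result)
-- ===== SOURCE B (Python) =====
-- def trim_code(text: str) -> str:
--     # Run-by-run scan: consume whole blank runs / non-blank runs; emit a blank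
--     # separator only between non-empty output and a following non-blank run,
--     # so no result[-1] inspection and no trailing-pop loop is needed.
--     def blank(line):
--         return line.strip() == ''
--     lines = text.splitlines()
--     n = len(lines)
--     parts = []
--     i = 0
--     while i < n:
--         j = i + 1
--         if blank(lines[i]):
--             while j < n and blank(lines[j]):
--                 j += 1
--             if parts and j < n:
--                 parts.append(lines[i])
--         else:
--             while j < n and not blank(lines[j]):
--                 j += 1
--             parts.extend(lines[i:j])
--         i = j
--     return '\n'.join(parts)
-- ===== Notes on version B (the rewrite author's own statement) =====
-- stated objective: alternative
-- what changed: B scans lines run-by-run (whole blank runs and non-blank runs at a time) and emits one blank separator only between non-empty output and a following non-blank run, so A's per-line inspection of result[-1] and the trailing-pop loop both disappear.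
import Mathlib
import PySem

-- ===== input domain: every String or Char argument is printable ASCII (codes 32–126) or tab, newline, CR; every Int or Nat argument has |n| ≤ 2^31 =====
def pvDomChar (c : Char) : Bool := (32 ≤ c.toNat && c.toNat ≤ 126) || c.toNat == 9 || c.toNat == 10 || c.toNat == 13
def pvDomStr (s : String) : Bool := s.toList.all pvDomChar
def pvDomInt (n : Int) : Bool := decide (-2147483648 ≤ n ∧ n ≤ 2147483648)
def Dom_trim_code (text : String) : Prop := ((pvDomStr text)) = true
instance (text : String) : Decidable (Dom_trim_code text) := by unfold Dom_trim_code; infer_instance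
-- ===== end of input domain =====

-- B replaces A's line-by-line pass (which re-checks result[-1] and pops trailing blanks at
-- the end) by a run-by-run scan emitting one blank separator between output and a following
-- non-blank run; objective: alternative decomposition, same cost.


-- ===== PORT A =====
-- line.strip() == ''  (the emptiness test both Pythons use)
def pyBlank (line : String) : Bool := PySem.Str.strip line == ""

-- the body of A's first for-loop (result[-1] on a non-empty list is getLastD)
def trimStep (res : List String) (line : String) : List String :=
  if pyBlank line && (res.isEmpty || pyBlank (res.getLastD "")) then res else res ++ [line]

-- A's second loop: while result and result[-1].strip() == '': result.pop()
def popBlanks (res : List String) : List String :=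
  if h : res ≠ [] ∧ pyBlank (res.getLastD "") = true then popBlanks res.dropLast else res
termination_by res.length
decreasing_by
  have hp : 0 < res.length := List.length_pos_iff.mpr h.1
  simp [List.length_dropLast]; omega

def trim_code (text : String) : String :=
  PySem.Str.join "\n" (popBlanks ((PySem.Str.splitlines text).foldl trimStep []))

-- ===== PORT B =====
-- B's while-loop over the remaining lines; the inner index scans (starting at j = i+1) are
-- the takeWhile/dropWhile over the tail ls.
def altGo (parts : List String) (lines : List String) : List String :=
  match lines with
  | [] => parts
  | l :: ls =>
    if pyBlank l then
      altGo (if parts ≠ [] ∧ ls.dropWhile pyBlank ≠ [] then parts ++ [l] else parts)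
            (ls.dropWhile pyBlank)
    else
      altGo (parts ++ l :: ls.takeWhile (fun x => !pyBlank x))
            (ls.dropWhile (fun x => !pyBlank x))
termination_by lines.length
decreasing_by
  · have := List.length_dropWhile_le pyBlank ls; simpa using Nat.lt_succ_of_le this
  · have := List.length_dropWhile_le (fun x => !pyBlank x) ls
    simpa using Nat.lt_succ_of_le this

def trim_code_alt (text : String) : String :=
  PySem.Str.join "\n" (altGo [] (PySem.Str.splitlines text))

-- ===== PRECONDITION & SPEC =====
def Spec_trim_code (text : String) (out : String) : Prop := out = trim_code_alt text
instance (text : String) (out : String) : Decidable (Spec_trim_code text out) := by unfold Spec_trim_code; infer_instance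

-- ===== CLAIM (what is proved, stated in full; the proofs are below) =====
def Claim_equal_trim_code : Prop := ∀ (text : String), Dom_trim_code text → Spec_trim_code text (trim_code text)

-- ===== LEMMAS AND PROOFS =====

theorem pyBlank_empty : pyBlank "" = true := by decide

theorem getLastD_append_cons (acc : List String) (a : String) (l : List String) (d : String) :
    (acc ++ a :: l).getLastD d = (a :: l).getLastD d := by
  rw [List.getLastD_eq_getLast?, List.getLastD_eq_getLast?,
      List.getLast?_append_of_ne_nil acc (by simp : (a :: l) ≠ [])]

theorem head_dropWhile_false {p : String → Bool} {l : List String} {r : String} {rs : List String}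
    (h : l.dropWhile p = r :: rs) : p r = false := by
  have h2 := List.head_dropWhile_not (p := p) (l := l) (w := by simp [h])
  simpa [h] using h2

-- A's fold skips a maximal blank prefix whenever the accumulator's last line is blank
-- (for an empty accumulator, getLastD picks "" which is blank, covering "not result")
theorem foldl_skip_blanks (ls : List String) (acc : List String)
    (h : pyBlank (acc.getLastD "") = true) :
    List.foldl trimStep acc ls = List.foldl trimStep acc (ls.dropWhile pyBlank) := by
  induction ls with
  | nil => rfl
  | cons l ls ih =>
      by_cases hl : pyBlank l = true
      · have h' : pyBlank (acc.getLast?.getD "") = true := by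
          rw [← List.getLastD_eq_getLast?]; exact h
        have hstep : trimStep acc l = acc := by simp [trimStep, hl, h']
        rw [List.dropWhile_cons]
        simp only [hl, if_true]
        rw [List.foldl_cons, hstep]
        exact ih
      · simp [hl]

-- A's fold appends a whole run of non-blank lines verbatim
theorem foldl_append_run (run : List String) (acc rest : List String)
    (h : ∀ x ∈ run, pyBlank x = false) :
    List.foldl trimStep acc (run ++ rest) = List.foldl trimStep (acc ++ run) rest := by
  induction run generalizing acc with
  | nil => simp
  | cons r rs ih =>
      have hr : pyBlank r = false := h r (by simp)
      have hstep : trimStep acc r = acc ++ [r] := by simp [trimStep, hr]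
      rw [List.cons_append, List.foldl_cons, hstep, ih _ (fun x hx => h x (by simp [hx]))]
      simp

theorem popBlanks_nil : popBlanks [] = [] := by
  unfold popBlanks; simp

theorem popBlanks_last_false {acc : List String} (h : pyBlank (acc.getLastD "") = false) :
    popBlanks acc = acc := by
  unfold popBlanks
  rw [dif_neg]
  rintro ⟨-, h2⟩
  rw [h] at h2
  exact Bool.false_ne_true h2

theorem popBlanks_concat_blank {b : String} (acc : List String) (h : pyBlank b = true) :
    popBlanks (acc ++ [b]) = popBlanks acc := by
  rw [popBlanks]
  rw [dif_pos ⟨by simp, by rw [List.getLastD_concat]; exact h⟩, List.dropLast_concat]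

-- Main invariant-carrying equivalence of the two loops: the accumulator either ends in a
-- non-blank line (or is empty), or the next line to come is non-blank.
theorem main_loop : ∀ (n : Nat) (lines acc : List String), lines.length ≤ n →
    (pyBlank (acc.getLastD "") = false ∨ acc = [] ∨
      (∃ r rs, lines = r :: rs ∧ pyBlank r = false)) →
    popBlanks (List.foldl trimStep acc lines) = altGo acc lines := by
  intro n
  induction n with
  | zero =>
      intro lines acc hlen hinv
      have : lines = [] := List.eq_nil_of_length_eq_zero (Nat.le_zero.mp hlen)
      subst this
      rw [altGo, List.foldl_nil]
      rcases hinv with h | h | ⟨r, rs, h, -⟩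
      · exact popBlanks_last_false h
      · rw [h]; exact popBlanks_nil
      · exact absurd h (by simp)
  | succ n ih =>
      intro lines acc hlen hinv
      match lines with
      | [] =>
          rw [altGo, List.foldl_nil]
          rcases hinv with h | h | ⟨r, rs, h, -⟩
          · exact popBlanks_last_false h
          · rw [h]; exact popBlanks_nil
          · exact absurd h (by simp)
      | l :: ls =>
          have hls : ls.length ≤ n := by simpa using hlen
          by_cases hb : pyBlank l = true
          · -- blank head: A skips (empty acc) or appends l, then skips the rest of the run
            rw [altGo]
            simp only [hb, if_true]
            have hrestlen : (ls.dropWhile pyBlank).length ≤ n :=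
              le_trans (List.length_dropWhile_le pyBlank ls) hls
            rcases hinv with hlast | hacc | ⟨r, rs, hrr, hrb⟩
            · -- acc nonempty, ends non-blank: A appends l
              have haccne : acc ≠ [] := by
                intro h; rw [h] at hlast; simp [pyBlank_empty] at hlast
              have hlast' : pyBlank (acc.getLast?.getD "") = false := by
                rw [← List.getLastD_eq_getLast?]; exact hlast
              have hstep : trimStep acc l = acc ++ [l] := by
                simp [trimStep, hb, hlast', haccne]
              rw [List.foldl_cons, hstep,
                  foldl_skip_blanks ls (acc ++ [l]) (by rw [List.getLastD_concat]; exact hb)]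
              match hrest : ls.dropWhile pyBlank with
              | [] =>
                  rw [List.foldl_nil, popBlanks_concat_blank acc hb,
                      popBlanks_last_false hlast, altGo]
                  simp
              | r :: rs =>
                  rw [if_pos ⟨haccne, by simp⟩]
                  exact ih (r :: rs) (acc ++ [l]) (hrest ▸ hrestlen)
                    (Or.inr (Or.inr ⟨r, rs, rfl, head_dropWhile_false hrest⟩))
            · -- acc empty: A skips the whole blank run
              subst hacc
              have hstep : trimStep [] l = [] := by simp [trimStep, hb]
              rw [List.foldl_cons, hstep, foldl_skip_blanks ls [] pyBlank_empty]
              rw [if_neg (by simp)]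
              exact ih (ls.dropWhile pyBlank) [] hrestlen (Or.inr (Or.inl rfl))
            · simp only [List.cons.injEq] at hrr
              rw [← hrr.1, hb] at hrb
              exact absurd hrb (by simp)
          · -- non-blank head: both consume the whole non-blank run
            have hb' : pyBlank l = false := by simpa using hb
            rw [altGo]
            simp only [hb', Bool.false_eq_true, if_false]
            have hsplit : l :: ls =
                (l :: ls.takeWhile (fun x => !pyBlank x)) ++ ls.dropWhile (fun x => !pyBlank x) := by
              simp [List.takeWhile_append_dropWhile]
            have hrun : ∀ x ∈ l :: ls.takeWhile (fun x => !pyBlank x), pyBlank x = false := by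
              intro x hx
              rcases List.mem_cons.mp hx with h | h
              · rw [h]; exact hb'
              · simpa using List.mem_takeWhile_imp h
            rw [hsplit, foldl_append_run _ acc _ hrun]
            have hdroplen : (ls.dropWhile (fun x => !pyBlank x)).length ≤ n :=
              le_trans (List.length_dropWhile_le _ ls) hls
            apply ih _ _ hdroplen
            left
            rw [getLastD_append_cons]
            rw [List.getLastD_cons]
            exact hrun _ List.getLastD_mem_cons

-- ===== VERDICT (by name: the statement is the Claim_ definition above) =====
theorem trim_code_spec : Claim_equal_trim_code := by
  intro text _
  show trim_code text = trim_code_alt text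
  unfold trim_code trim_code_alt
  congr 1
  exact main_loop (PySem.Str.splitlines text).length _ [] le_rfl (Or.inr (Or.inl rfl))
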